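-- pv_equiv track=rewrite | github.com/auto-network/autonomy | tools/dashboard/server.py | _parse_settings_read_params
-- ===== SOURCE A (Python) =====
-- def _parse_settings_read_params(query_params) -> tuple[int | None, int | None, int | None, str | None]:
--     """Pull target/min/stored revision + error str from query params."""
--     def _to_int(name):
--         v = query_params.get(name)
--         if v is None:
--             return None
--         try:
--             return int(v)
--         except ValueError:
--             return f"invalid {name}: {v!r}"
--     for name in ("target_revision", "min_revision", "stored_revision"):
--         v = _to_int(name)
--         if isinstance(v, str):
--             return None, None, None, v
--     return (
--         int(query_params["target_revision"]) if "target_revision" in query_params else None,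
--         int(query_params["min_revision"]) if "min_revision" in query_params else None,
--         int(query_params["stored_revision"]) if "stored_revision" in query_params else None,
--         None,
--     )
-- ===== SOURCE B (Python) =====
-- def _parse_settings_read_params(query_params) -> tuple[int | None, int | None, int | None, str | None]:
--     """Pull target/min/stored revision + error str from query params (single pass)."""
--     results = []
--     for name in ("target_revision", "min_revision", "stored_revision"):
--         v = query_params.get(name)
--         if v is None:
--             results.append(None)
--             continue
--         try:
--             results.append(int(v))
--         except ValueError:
--             return None, None, None, f"invalid {name}: {v!r}"
--     return tuple(results) + (None,)
-- ===== Notes on version B (the rewrite author's own statement) =====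
-- stated objective: simpler
-- what changed: Replaced A's two-pass validate-then-reconvert structure (a helper returning int/str/None, a scan for errors, then three fresh lookups and int() re-conversions) with a single pass that converts each of the three names once, collecting the results and returning the first error immediately.
import Mathlib
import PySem

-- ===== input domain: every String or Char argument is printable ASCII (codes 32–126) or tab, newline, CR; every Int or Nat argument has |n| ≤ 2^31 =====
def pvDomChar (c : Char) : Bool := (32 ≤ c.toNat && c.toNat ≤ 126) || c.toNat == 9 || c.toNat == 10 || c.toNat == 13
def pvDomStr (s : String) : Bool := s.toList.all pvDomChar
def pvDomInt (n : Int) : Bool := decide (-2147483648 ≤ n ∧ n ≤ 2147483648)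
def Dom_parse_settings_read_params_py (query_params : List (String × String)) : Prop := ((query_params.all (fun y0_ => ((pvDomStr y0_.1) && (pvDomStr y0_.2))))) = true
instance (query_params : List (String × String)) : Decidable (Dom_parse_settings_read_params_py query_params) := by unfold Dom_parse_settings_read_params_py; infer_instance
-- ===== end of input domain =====

-- B replaces A's validate-then-reconvert two-pass structure with a single pass that
-- converts each name once while collecting results (objective: simpler).

-- Python's repr(v) for a str v — exact on Dom's character set (printable ASCII, tab, LF, CR):
-- quote choice (double quotes iff v contains ' and not ") and escapes for \, tab, LF, CR and the quote.
def pvRepr (s : String) : String :=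
  let cs := s.toList
  let q : Char := if cs.contains '\'' && !(cs.contains '"') then '"' else '\''
  String.ofList ((q :: cs.flatMap (fun c =>
    if c = '\\' then ['\\', '\\']
    else if c = '\t' then ['\\', 't']
    else if c = '\n' then ['\\', 'n']
    else if c = '\r' then ['\\', 'r']
    else if c = q then ['\\', q]
    else [c])) ++ [q])

-- ===== PORT A =====
-- A's inner helper _to_int: None / int value (inl) / error string (inr)
def pvToInt (query_params : List (String × String)) (name : String) : Option (Int ⊕ String) :=
  match List.lookup name query_params with
  | none => none
  | some v =>
    match PySem.Int.ofStr? v with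
    | some n => some (Sum.inl n)
    | none => some (Sum.inr ("invalid " ++ name ++ ": " ++ pvRepr v))

-- A's for-loop over the three names: first error string, if any
def pvALoop (query_params : List (String × String)) : List String → Option String
  | [] => none
  | name :: rest =>
    match pvToInt query_params name with
    | some (Sum.inr s) => some s
    | _ => pvALoop query_params rest

def parse_settings_read_params_py (query_params : List (String × String)) : Option Int × Option Int × Option Int × Option String :=
  match pvALoop query_params ["target_revision", "min_revision", "stored_revision"] with
  | some s => (none, none, none, some s)
  | none =>
    ((List.lookup "target_revision" query_params).bind PySem.Int.ofStr?,
     (List.lookup "min_revision" query_params).bind PySem.Int.ofStr?,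
     (List.lookup "stored_revision" query_params).bind PySem.Int.ofStr?,
     none)

-- ===== PORT B =====
-- B's single pass: convert each name once, accumulating results; first failure returns at once
def pvBLoop (query_params : List (String × String)) : List String → List (Option Int) → Option Int × Option Int × Option Int × Option String
  | [], results =>
    match results with
    | [a, b, c] => (a, b, c, none)
    | _ => (none, none, none, none)  -- unreachable: the loop is always run over the 3 names
  | name :: rest, results =>
    match List.lookup name query_params with
    | none => pvBLoop query_params rest (results ++ [none])
    | some v =>
      match PySem.Int.ofStr? v with
      | some n => pvBLoop query_params rest (results ++ [some n])
      | none => (none, none, none, some ("invalid " ++ name ++ ": " ++ pvRepr v))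

def parse_settings_read_params_py_alt (query_params : List (String × String)) : Option Int × Option Int × Option Int × Option String :=
  pvBLoop query_params ["target_revision", "min_revision", "stored_revision"] []

-- ===== PRECONDITION & SPEC =====
def Spec_parse_settings_read_params_py (query_params : List (String × String)) (out : Option Int × Option Int × Option Int × Option String) : Prop := out = parse_settings_read_params_py_alt query_params
instance (query_params : List (String × String)) (out : Option Int × Option Int × Option Int × Option String) : Decidable (Spec_parse_settings_read_params_py query_params out) := by unfold Spec_parse_settings_read_params_py; infer_instance

-- ===== CLAIM (what is proved, stated in full; the proofs are below) =====
def Claim_equal_parse_settings_read_params_py : Prop := ∀ (query_params : List (String × String)), Dom_parse_settings_read_params_py query_params → Spec_parse_settings_read_params_py query_params (parse_settings_read_params_py query_params)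

-- ===== LEMMAS AND PROOFS =====

theorem pv_main (query_params : List (String × String)) :
    parse_settings_read_params_py query_params = parse_settings_read_params_py_alt query_params := by
  cases h1 : List.lookup "target_revision" query_params with
  | none =>
    cases h2 : List.lookup "min_revision" query_params with
    | none =>
      cases h3 : List.lookup "stored_revision" query_params with
      | none =>
        simp [parse_settings_read_params_py, parse_settings_read_params_py_alt, pvALoop, pvToInt, pvBLoop, h1, h2, h3]
      | some v3 =>
        cases p3 : PySem.Int.ofStr? v3 with
        | none =>
          simp [parse_settings_read_params_py, parse_settings_read_params_py_alt, pvALoop, pvToInt, pvBLoop, h1, h2, h3, p3]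
        | some n3 =>
          simp [parse_settings_read_params_py, parse_settings_read_params_py_alt, pvALoop, pvToInt, pvBLoop, h1, h2, h3, p3]
    | some v2 =>
      cases p2 : PySem.Int.ofStr? v2 with
      | none =>
        simp [parse_settings_read_params_py, parse_settings_read_params_py_alt, pvALoop, pvToInt, pvBLoop, h1, h2, p2]
      | some n2 =>
        cases h3 : List.lookup "stored_revision" query_params with
        | none =>
          simp [parse_settings_read_params_py, parse_settings_read_params_py_alt, pvALoop, pvToInt, pvBLoop, h1, h2, p2, h3]
        | some v3 =>
          cases p3 : PySem.Int.ofStr? v3 with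
          | none =>
            simp [parse_settings_read_params_py, parse_settings_read_params_py_alt, pvALoop, pvToInt, pvBLoop, h1, h2, p2, h3, p3]
          | some n3 =>
            simp [parse_settings_read_params_py, parse_settings_read_params_py_alt, pvALoop, pvToInt, pvBLoop, h1, h2, p2, h3, p3]
  | some v1 =>
    cases p1 : PySem.Int.ofStr? v1 with
    | none =>
      simp [parse_settings_read_params_py, parse_settings_read_params_py_alt, pvALoop, pvToInt, pvBLoop, h1, p1]
    | some n1 =>
      cases h2 : List.lookup "min_revision" query_params with
      | none =>
        cases h3 : List.lookup "stored_revision" query_params with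
        | none =>
          simp [parse_settings_read_params_py, parse_settings_read_params_py_alt, pvALoop, pvToInt, pvBLoop, h1, p1, h2, h3]
        | some v3 =>
          cases p3 : PySem.Int.ofStr? v3 with
          | none =>
            simp [parse_settings_read_params_py, parse_settings_read_params_py_alt, pvALoop, pvToInt, pvBLoop, h1, p1, h2, h3, p3]
          | some n3 =>
            simp [parse_settings_read_params_py, parse_settings_read_params_py_alt, pvALoop, pvToInt, pvBLoop, h1, p1, h2, h3, p3]
      | some v2 =>
        cases p2 : PySem.Int.ofStr? v2 with
        | none =>
          simp [parse_settings_read_params_py, parse_settings_read_params_py_alt, pvALoop, pvToInt, pvBLoop, h1, p1, h2, p2]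
        | some n2 =>
          cases h3 : List.lookup "stored_revision" query_params with
          | none =>
            simp [parse_settings_read_params_py, parse_settings_read_params_py_alt, pvALoop, pvToInt, pvBLoop, h1, p1, h2, p2, h3]
          | some v3 =>
            cases p3 : PySem.Int.ofStr? v3 with
            | none =>
              simp [parse_settings_read_params_py, parse_settings_read_params_py_alt, pvALoop, pvToInt, pvBLoop, h1, p1, h2, p2, h3, p3]
            | some n3 =>
              simp [parse_settings_read_params_py, parse_settings_read_params_py_alt, pvALoop, pvToInt, pvBLoop, h1, p1, h2, p2, h3, p3]

-- ===== VERDICT (by name: the statement is the Claim_ definition above) =====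
theorem parse_settings_read_params_py_spec : Claim_equal_parse_settings_read_params_py := by
  intro query_params _
  unfold Spec_parse_settings_read_params_py
  exact pv_main query_params
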